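-- pv_equiv track=rewrite | github.com/theinfosecguy/razin | src/razin/dsl/operations/confusable_identifier.py | _frontmatter_token_line
-- ===== SOURCE A (Python) =====
-- def _frontmatter_token_line(raw_text: str, token: str) -> int:
--     """Return the 1-based line number where a token appears within the frontmatter block."""
--     lines = raw_text.splitlines()
--     in_frontmatter = False
--     for idx, line in enumerate(lines, 1):
--         stripped = line.strip()
--         if idx == 1 and stripped == "---":
--             in_frontmatter = True
--             continue
--         if in_frontmatter and stripped in ("---", "..."):
--             break
--         if in_frontmatter and token in line:
--             return idx
--     return 1
-- ===== SOURCE B (Python) =====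
-- def _frontmatter_token_line(raw_text: str, token: str) -> int:
--     """Return the 1-based line number where a token appears within the frontmatter block."""
--     lines = raw_text.splitlines()
--     if not lines or lines[0].strip() != "---":
--         return 1
--     body = []
--     for line in lines[1:]:
--         if line.strip() in ("---", "..."):
--             break
--         body.append(line)
--     for lineno, line in enumerate(body, 2):
--         if token in line:
--             return lineno
--     return 1
-- ===== Notes on version B (the rewrite author's own statement) =====
-- stated objective: simpler
-- what changed: Replaces the one-pass in_frontmatter state machine (flag plus idx==1 special case) with a guard on the first line, an explicit extraction of the delimited frontmatter body, and a separate search of that body.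
import Mathlib
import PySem

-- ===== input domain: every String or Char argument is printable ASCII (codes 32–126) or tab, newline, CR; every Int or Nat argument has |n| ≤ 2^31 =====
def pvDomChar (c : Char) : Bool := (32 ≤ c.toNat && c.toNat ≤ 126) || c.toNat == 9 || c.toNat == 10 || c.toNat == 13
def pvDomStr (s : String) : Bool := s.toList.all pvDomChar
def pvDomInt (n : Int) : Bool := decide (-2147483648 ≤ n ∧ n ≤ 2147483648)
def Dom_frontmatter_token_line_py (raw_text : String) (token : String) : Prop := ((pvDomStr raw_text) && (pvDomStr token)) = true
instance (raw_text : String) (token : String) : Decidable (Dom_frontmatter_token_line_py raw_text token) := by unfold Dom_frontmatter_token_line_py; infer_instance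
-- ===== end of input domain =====

-- B replaces A's in_frontmatter state machine by a first-line guard, explicit body extraction, and a body search (simpler decomposition; return value only).

-- ===== PORT A =====
-- the enumerate(lines, 1) loop: idx, in_frontmatter carried as state; 'break' and the final 'return 1' both yield 1
def fmA_loop (token : String) : List String → Int → Bool → Int
  | [], _, _ => 1
  | line :: rest, idx, inFm =>
    let stripped := PySem.Str.strip line
    if idx = 1 ∧ stripped = "---" then fmA_loop token rest (idx + 1) true
    else if inFm ∧ (stripped = "---" ∨ stripped = "...") then 1
    else if inFm ∧ PySem.Str.isIn token line then idx
    else fmA_loop token rest (idx + 1) inFm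

def frontmatter_token_line_py (raw_text : String) (token : String) : Int :=
  fmA_loop token (PySem.Str.splitlines raw_text) 1 false

-- ===== PORT B =====
-- body: lines after the first, up to (excluding) the first '---'/'...' line
def fmB_body : List String → List String
  | [] => []
  | line :: rest =>
    if PySem.Str.strip line = "---" ∨ PySem.Str.strip line = "..." then []
    else line :: fmB_body rest

-- search the body, 1-based line numbers starting at 2
def fmB_search (token : String) : List String → Int → Int
  | [], _ => 1
  | line :: rest, lineno => if PySem.Str.isIn token line then lineno else fmB_search token rest (lineno + 1)

def frontmatter_token_line_py_alt (raw_text : String) (token : String) : Int :=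
  match PySem.Str.splitlines raw_text with
  | [] => 1
  | first :: rest =>
    if PySem.Str.strip first ≠ "---" then 1
    else fmB_search token (fmB_body rest) 2

-- ===== PRECONDITION & SPEC =====
def Spec_frontmatter_token_line_py (raw_text : String) (token : String) (out : Int) : Prop := out = frontmatter_token_line_py_alt raw_text token
instance (raw_text : String) (token : String) (out : Int) : Decidable (Spec_frontmatter_token_line_py raw_text token out) := by unfold Spec_frontmatter_token_line_py; infer_instance

-- ===== CLAIM (what is proved, stated in full; the proofs are below) =====
def Claim_equal_frontmatter_token_line_py : Prop := ∀ (raw_text : String) (token : String), Dom_frontmatter_token_line_py raw_text token → Spec_frontmatter_token_line_py raw_text token (frontmatter_token_line_py raw_text token)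

-- ===== LEMMAS AND PROOFS =====
-- with in_frontmatter permanently false (and idx past 1), A's loop returns 1
theorem fmA_loop_false (token : String) (ls : List String) (idx : Int) (h : 2 ≤ idx) :
    fmA_loop token ls idx false = 1 := by
  induction ls generalizing idx with
  | nil => rfl
  | cons line rest ih =>
    simp only [fmA_loop]
    rw [if_neg (by simp; omega), if_neg (by simp), if_neg (by simp)]
    exact ih (idx + 1) (by omega)

-- inside the frontmatter, A's loop equals B's search of the extracted body
theorem fmA_loop_true (token : String) (ls : List String) (idx : Int) (h : 2 ≤ idx) :
    fmA_loop token ls idx true = fmB_search token (fmB_body ls) idx := by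
  induction ls generalizing idx with
  | nil => rfl
  | cons line rest ih =>
    simp only [fmA_loop, fmB_body]
    rw [if_neg (by simp; omega)]
    by_cases hd : PySem.Str.strip line = "---" ∨ PySem.Str.strip line = "..."
    · rw [if_pos ⟨trivial, hd⟩, if_pos hd]; rfl
    · rw [if_neg (by simpa using hd), if_neg hd]
      by_cases ht : PySem.Str.isIn token line = true
      · rw [if_pos ⟨trivial, ht⟩]
        simp only [fmB_search]
        rw [if_pos ht]
      · rw [if_neg (by simpa using ht)]
        simp only [fmB_search]
        rw [if_neg ht]
        exact ih (idx + 1) (by omega)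

-- ===== VERDICT (by name: the statement is the Claim_ definition above) =====
theorem frontmatter_token_line_py_spec : Claim_equal_frontmatter_token_line_py := by
  intro raw_text token _
  unfold Spec_frontmatter_token_line_py frontmatter_token_line_py frontmatter_token_line_py_alt
  cases h : PySem.Str.splitlines raw_text with
  | nil => rfl
  | cons first rest =>
    by_cases hf : PySem.Str.strip first = "---"
    · simp only [fmA_loop]
      rw [if_pos ⟨trivial, hf⟩, fmA_loop_true token rest (1 + 1) (by norm_num)]
      rw [if_neg (by simp [hf])]; norm_num
    · simp only [fmA_loop]
      rw [if_neg (by simp [hf]), if_neg (by simp), if_neg (by simp),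
        fmA_loop_false token rest (1 + 1) (by norm_num), if_pos hf]
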